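-- pv_equiv track=rewrite | github.com/Blu3P34/Hangman | game_layout.py | display
-- ===== SOURCE A (Python) =====
-- true_ans = "Anakin Skywalker"
--
-- def display(true_ans) :
--     mystery_word = ""
--     for letter in true_ans :
--         if letter != " " :
--             mystery_word = mystery_word + "_"
--         else :
--             mystery_word = mystery_word + " "
--     return mystery_word
-- ===== SOURCE B (Python) =====
-- def display(true_ans):
--     # split on spaces, mask each word with underscores of its length, rejoin
--     return " ".join("_" * len(word) for word in true_ans.split(" "))
-- ===== Notes on version B (the rewrite author's own statement) =====
-- stated objective: faster
-- what changed: Replaces the per-character branch-and-concatenate loop by splitting on spaces, masking each segment with an underscore run of its length, and rejoining with spaces; no character-level loop or accumulator string remains.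
import Mathlib
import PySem

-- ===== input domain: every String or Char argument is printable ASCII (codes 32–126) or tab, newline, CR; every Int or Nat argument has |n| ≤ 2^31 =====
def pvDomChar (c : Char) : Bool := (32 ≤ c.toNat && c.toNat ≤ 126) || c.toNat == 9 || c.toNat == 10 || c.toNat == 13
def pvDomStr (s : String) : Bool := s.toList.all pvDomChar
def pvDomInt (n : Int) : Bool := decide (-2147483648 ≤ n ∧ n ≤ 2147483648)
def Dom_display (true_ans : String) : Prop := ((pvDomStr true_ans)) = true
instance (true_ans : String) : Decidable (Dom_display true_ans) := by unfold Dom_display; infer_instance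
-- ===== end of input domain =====

-- B replaces the per-character branch-and-concatenate loop by split-on-space / mask each segment / rejoin (idiomatic; return value proved equal).


-- ===== PORT A =====
-- for letter in true_ans: append "_" or " " to the accumulator string
def display (true_ans : String) : String :=
  String.ofList (true_ans.toList.foldl
    (fun mystery_word letter =>
      if letter ≠ ' ' then mystery_word ++ ['_'] else mystery_word ++ [' '])
    [])

-- ===== PORT B =====
-- " ".join("_" * len(word) for word in true_ans.split(" "))
def display_alt (true_ans : String) : String :=
  PySem.Str.join " "
    (((PySem.Str.split? true_ans " ").getD []).map
      (fun word => String.ofList (List.replicate (PySem.Str.len word).toNat '_')))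

-- ===== PRECONDITION & SPEC =====
def Spec_display (true_ans : String) (out : String) : Prop := out = display_alt true_ans
instance (true_ans : String) (out : String) : Decidable (Spec_display true_ans out) := by unfold Spec_display; infer_instance

-- ===== CLAIM (what is proved, stated in full; the proofs are below) =====
def Claim_equal_display : Prop := ∀ (true_ans : String), Dom_display true_ans → Spec_display true_ans (display true_ans)

-- ===== LEMMAS AND PROOFS =====

-- proof-side characterisation of splitting on a single space
def pvSplit : List Char → List (List Char)
  | [] => [[]]
  | c :: rest => if c = ' ' then [] :: pvSplit rest else (pvSplit rest).modifyHead (c :: ·)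

theorem pvSplit_ne_nil (l : List Char) : pvSplit l ≠ [] := by
  induction l with
  | nil => simp [pvSplit]
  | cons c rest ih =>
    simp only [pvSplit]
    split_ifs
    · simp
    · cases h : pvSplit rest with
      | nil => exact absurd h ih
      | cons w ws => simp [List.modifyHead]

theorem pvSplit_go_eq (fuel : Nat) (l cur : List Char) (acc : List (List Char))
    (h : l.length ≤ fuel) :
    PySem.Chars.splitOn.go [' '] fuel l cur acc
      = acc.reverse ++ (pvSplit l).modifyHead (cur.reverse ++ ·) := by
  induction fuel generalizing l cur acc with
  | zero =>
    have : l = [] := by cases l <;> simp_all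
    subst this
    simp [PySem.Chars.splitOn.go, pvSplit, List.modifyHead]
  | succ fuel ih =>
    cases l with
    | nil => simp [PySem.Chars.splitOn.go, pvSplit, List.modifyHead]
    | cons c rest =>
      by_cases hc : c = ' '
      · subst hc
        have hpre : List.isPrefixOf [' '] (' ' :: rest) = true := by
          simp [List.isPrefixOf]
        rw [PySem.Chars.splitOn.go]
        simp only [hpre, if_pos]
        rw [ih _ _ _ (by simpa using Nat.le_of_succ_le_succ h)]
        simp only [pvSplit, List.reverse_cons,
          List.append_assoc, List.singleton_append]
        cases hx : pvSplit rest <;> simp [hx, List.modifyHead]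
      · have hpre : List.isPrefixOf [' '] (c :: rest) = false := by
          simp [List.isPrefixOf]
          intro h'; exact hc h'.symm
        rw [PySem.Chars.splitOn.go]
        simp only [hpre]
        rw [if_neg (by simp)]
        rw [ih rest (c :: cur) acc (Nat.le_of_succ_le_succ h)]
        obtain ⟨w, ws, hw⟩ : ∃ w ws, pvSplit rest = w :: ws := by
          cases hx : pvSplit rest with
          | nil => exact absurd hx (pvSplit_ne_nil rest)
          | cons w ws => exact ⟨w, ws, rfl⟩
        simp [pvSplit, hc, hw, List.modifyHead]

theorem splitOn_space (l : List Char) : PySem.Chars.splitOn l [' '] = pvSplit l := by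
  unfold PySem.Chars.splitOn
  rw [pvSplit_go_eq _ _ _ _ (Nat.le_succ_of_le (Nat.le_refl _))]
  cases h : pvSplit l <;> simp [List.modifyHead]

theorem join_mask (l : List Char) :
    PySem.Chars.join [' '] ((pvSplit l).map (fun w => List.replicate w.length '_'))
      = l.map (fun c => if c ≠ ' ' then '_' else ' ') := by
  induction l with
  | nil => simp [pvSplit, PySem.Chars.join_singleton]
  | cons c rest ih =>
    obtain ⟨w, ws, hw⟩ : ∃ w ws, pvSplit rest = w :: ws := by
      cases hx : pvSplit rest with
      | nil => exact absurd hx (pvSplit_ne_nil rest)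
      | cons w ws => exact ⟨w, ws, rfl⟩
    rw [hw] at ih
    by_cases hc : c = ' '
    · subst hc
      have h1 : pvSplit (' ' :: rest) = [] :: w :: ws := by simp [pvSplit, hw]
      rw [h1]
      simp only [List.map_cons] at ih ⊢
      rw [PySem.Chars.join_cons_cons]
      simp [ih]
    · have h1 : pvSplit (c :: rest) = (c :: w) :: ws := by
        simp [pvSplit, hc, hw, List.modifyHead]
      rw [h1]
      cases ws with
      | nil =>
        simp only [List.map_cons, List.map_nil] at ih ⊢
        rw [PySem.Chars.join_singleton] at ih ⊢
        simp [List.replicate_succ, ih, hc]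
      | cons q qs =>
        simp only [List.map_cons] at ih ⊢
        rw [PySem.Chars.join_cons_cons] at ih ⊢
        simp only [List.length_cons, List.replicate_succ, List.cons_append]
        rw [ih]
        simp [hc]

theorem display_toList (s : String) :
    (display s).toList = s.toList.map (fun c => if c ≠ ' ' then '_' else ' ') := by
  unfold display
  have hfun : (fun (mystery_word : List Char) (letter : Char) =>
      if letter ≠ ' ' then mystery_word ++ ['_'] else mystery_word ++ [' '])
      = fun mystery_word letter => mystery_word ++ [if letter ≠ ' ' then '_' else ' '] := by
    funext a c; split_ifs <;> rfl
  rw [hfun, PySem.List.foldl_append_singleton_eq_map]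
  simp [String.toList_ofList]

theorem display_alt_toList (s : String) :
    (display_alt s).toList = s.toList.map (fun c => if c ≠ ' ' then '_' else ' ') := by
  unfold display_alt
  have hsplit := PySem.Str.split?_map s " "
  have hsep : (" " : String).toList = [' '] := rfl
  rw [hsep] at hsplit
  rw [show PySem.Chars.split? s.toList [' '] = some (PySem.Chars.splitOn s.toList [' ']) from by
    simp [PySem.Chars.split?]] at hsplit
  cases hp : PySem.Str.split? s " " with
  | none => rw [hp] at hsplit; simp at hsplit
  | some parts =>
    rw [hp] at hsplit
    simp only [Option.map_some, Option.some.injEq] at hsplit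
    simp only [Option.getD_some]
    rw [PySem.Str.toList_join]
    have hmap : List.map String.toList
        (parts.map (fun word => String.ofList (List.replicate (PySem.Str.len word).toNat '_')))
        = (pvSplit s.toList).map (fun w => List.replicate w.length '_') := by
      rw [← splitOn_space, ← hsplit]
      simp [List.map_map, Function.comp, PySem.Str.len_eq, String.toList_ofList]
    rw [hsep, hmap]
    exact join_mask s.toList

theorem display_spec : Claim_equal_display := by
  intro s _
  unfold Spec_display
  rw [← String.toList_inj, display_toList, display_alt_toList]
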